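-- pv_equiv track=rewrite | github.com/yinz628/xui_config | xui_port_pool_generator/xray_renderer.py | decode_alpn
-- ===== SOURCE A (Python) =====
-- def decode_alpn(items: list[str] | None) -> list[str] | None:
--     if not items:
--         return None
--     decoded: list[str] = []
--     for item in items:
--         normalized = str(item).replace("%2F", "/").replace("%2C", ",")
--         decoded.extend(part for part in normalized.split(",") if part)
--     return decoded or None
-- ===== SOURCE B (Python) =====
-- def decode_alpn(items):
--     if not items:
--         return None
--     out = []
--     for item in items:
--         s = str(item)
--         token = []
--         i = 0
--         n = len(s)
--         while i < n:
--             c = s[i]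
--             if c == '%' and s[i+1:i+3] == '2F':
--                 token.append('/')
--                 i += 3
--             elif c == '%' and s[i+1:i+3] == '2C':
--                 if token:
--                     out.append(''.join(token))
--                 token = []
--                 i += 3
--             elif c == ',':
--                 if token:
--                     out.append(''.join(token))
--                 token = []
--                 i += 1
--             else:
--                 token.append(c)
--                 i += 1
--         if token:
--             out.append(''.join(token))
--     return out or None
-- ===== Notes on version B (the rewrite author's own statement) =====
-- stated objective: alternative
-- what changed: A pipelines library string operations (two .replace passes, a .split, a filter) per item; B instead runs one hand-written character scanner per item with an explicit token accumulator that recognises %2F/%2C and comma boundaries inline, emitting nonempty tokens as it goes; correct because the two patterns share no overlap and their replacements (/ and ,) never create new matches.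
import Mathlib
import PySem

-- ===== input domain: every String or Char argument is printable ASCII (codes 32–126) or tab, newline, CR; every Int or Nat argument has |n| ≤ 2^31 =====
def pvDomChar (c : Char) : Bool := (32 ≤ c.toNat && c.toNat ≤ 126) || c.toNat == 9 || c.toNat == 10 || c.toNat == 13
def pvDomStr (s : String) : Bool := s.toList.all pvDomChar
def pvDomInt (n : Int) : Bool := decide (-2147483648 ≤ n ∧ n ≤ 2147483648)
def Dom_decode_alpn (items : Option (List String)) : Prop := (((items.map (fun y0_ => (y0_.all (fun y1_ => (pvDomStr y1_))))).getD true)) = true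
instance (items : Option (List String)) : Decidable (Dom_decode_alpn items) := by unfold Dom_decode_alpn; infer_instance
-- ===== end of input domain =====

-- B replaces A's replace/split string pipeline by a single hand-written character scanner
-- that decodes %2F/%2C and splits tokens in one pass (objective: alternative; same asymptotic cost).

-- ===== PORT A =====
-- '.split(",")': the separator is the nonempty literal ",", so split? is always `some`; getD [] is unreachable
def decode_alpn (items : Option (List String)) : Option (List String) :=
  match items with
  | none => none
  | some xs =>
    if xs = [] then none
    else
      let decoded := xs.foldl (fun acc item =>
        let normalized := PySem.Str.replace (PySem.Str.replace item "%2F" "/") "%2C" ","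
        acc ++ ((PySem.Str.split? normalized ",").getD []).filter (fun part => part ≠ "")) []
      if decoded = [] then none else some decoded

-- ===== PORT B =====
-- the while-loop of Source B: cs is the unread suffix of the item, token the pending chars, out the tokens so far;
-- 's[i+1:i+3] == "2F"' is 'rest.take 2 = ['2','F']', ''.join(token) is String.ofList
def pvScan (cs token : List Char) (out : List String) : List String :=
  match cs with
  | [] => if token ≠ [] then out ++ [String.ofList token] else out
  | c :: rest =>
    if c = '%' ∧ rest.take 2 = ['2', 'F'] then
      pvScan (rest.drop 2) (token ++ ['/']) out
    else if c = '%' ∧ rest.take 2 = ['2', 'C'] then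
      pvScan (rest.drop 2) [] (if token ≠ [] then out ++ [String.ofList token] else out)
    else if c = ',' then
      pvScan rest [] (if token ≠ [] then out ++ [String.ofList token] else out)
    else
      pvScan rest (token ++ [c]) out
termination_by cs.length
decreasing_by all_goals (simp [List.length_drop]; try omega)

def decode_alpn_alt (items : Option (List String)) : Option (List String) :=
  match items with
  | none => none
  | some xs =>
    if xs = [] then none
    else
      let out := xs.foldl (fun out item => pvScan item.toList [] out) []
      if out = [] then none else some out

-- ===== PRECONDITION & SPEC =====
def Spec_decode_alpn (items : Option (List String)) (out : Option (List String)) : Prop := out = decode_alpn_alt items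
instance (items : Option (List String)) (out : Option (List String)) : Decidable (Spec_decode_alpn items out) := by unfold Spec_decode_alpn; infer_instance

-- ===== CLAIM (what is proved, stated in full; the proofs are below) =====
def Claim_equal_decode_alpn : Prop := ∀ (items : Option (List String)), Dom_decode_alpn items → Spec_decode_alpn items (decode_alpn items)

-- ===== LEMMAS AND PROOFS =====

-- ---- equations for PySem.Chars.replace.go ----
theorem rgo_nil (old new : List Char) (fuel : Nat) (acc : List Char) :
    PySem.Chars.replace.go old new fuel [] acc = acc.reverse := by
  cases fuel <;> simp [PySem.Chars.replace.go]

theorem rgo_cons (old new : List Char) (fuel : Nat) (c : Char) (t acc : List Char) :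
    PySem.Chars.replace.go old new (fuel + 1) (c :: t) acc =
      if old.isPrefixOf (c :: t) = true then
        PySem.Chars.replace.go old new fuel ((c :: t).drop old.length) (new.reverse ++ acc)
      else
        PySem.Chars.replace.go old new fuel t (c :: acc) := by
  simp [PySem.Chars.replace.go]

-- accumulator/fuel normalisation for replace.go
theorem rgo_norm (old new : List Char) (ho : old ≠ []) :
    ∀ fuel l acc, l.length ≤ fuel →
      PySem.Chars.replace.go old new fuel l acc =
        acc.reverse ++ PySem.Chars.replace.go old new l.length l [] := by
  intro fuel
  induction fuel using Nat.strong_induction_on with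
  | _ fuel ih =>
    intro l acc h
    cases l with
    | nil => rw [rgo_nil, rgo_nil]; simp
    | cons c t =>
      cases fuel with
      | zero => simp at h
      | succ n =>
        have ht : t.length ≤ n := by simpa using h
        have hol : 1 ≤ old.length := by cases old with | nil => exact absurd rfl ho | cons _ _ => simp
        simp only [List.length_cons]
        rw [rgo_cons, rgo_cons]
        by_cases hp : old.isPrefixOf (c :: t) = true
        · rw [if_pos hp, if_pos hp]
          have hdl : ((c :: t).drop old.length).length ≤ t.length := by
            simp only [List.length_drop, List.length_cons]; omega
          rw [ih n (Nat.lt_succ_self n) ((c :: t).drop old.length) (new.reverse ++ acc) (hdl.trans ht),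
              ih t.length (Nat.lt_succ_of_le ht) ((c :: t).drop old.length) (new.reverse ++ []) hdl]
          simp
        · rw [if_neg hp, if_neg hp]
          rw [ih n (Nat.lt_succ_self n) t (c :: acc) ht,
              ih t.length (Nat.lt_succ_of_le ht) t (c :: []) le_rfl]
          simp

theorem replace_canon (l old new : List Char) (ho : old ≠ []) :
    PySem.Chars.replace l old new = PySem.Chars.replace.go old new l.length l [] := by
  simp [PySem.Chars.replace, ho]

theorem replace_cons_neg (old new : List Char) (ho : old ≠ []) (c : Char) (t : List Char)
    (hp : old.isPrefixOf (c :: t) = false) :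
    PySem.Chars.replace (c :: t) old new = c :: PySem.Chars.replace t old new := by
  rw [replace_canon _ _ _ ho, replace_canon _ _ _ ho]
  simp only [List.length_cons]
  rw [rgo_cons, if_neg (by simp [hp]), rgo_norm old new ho t.length t [c] le_rfl]
  simp

theorem replace_cons_pos (old new : List Char) (ho : old ≠ []) (c : Char) (t : List Char)
    (hp : old.isPrefixOf (c :: t) = true) :
    PySem.Chars.replace (c :: t) old new =
      new ++ PySem.Chars.replace ((c :: t).drop old.length) old new := by
  have hol : 1 ≤ old.length := by cases old with | nil => exact absurd rfl ho | cons _ _ => simp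
  have hdl : ((c :: t).drop old.length).length ≤ t.length := by
    simp only [List.length_drop, List.length_cons]; omega
  rw [replace_canon _ _ _ ho, replace_canon _ _ _ ho]
  simp only [List.length_cons]
  rw [rgo_cons, if_pos hp,
      rgo_norm old new ho t.length ((c :: t).drop old.length) (new.reverse ++ []) hdl]
  simp

-- the composed per-string decoding A performs: first %2F -> /, then %2C -> ,
def Rnorm (cs : List Char) : List Char :=
  PySem.Chars.replace (PySem.Chars.replace cs "%2F".toList "/".toList) "%2C".toList [',']

theorem Rnorm_nil : Rnorm [] = [] := by decide

theorem F_ne : ("%2F".toList : List Char) ≠ [] := by decide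
theorem C_ne : ("%2C".toList : List Char) ≠ [] := by decide

theorem Rnorm_F (rest : List Char) : Rnorm ('%' :: '2' :: 'F' :: rest) = '/' :: Rnorm rest := by
  unfold Rnorm
  rw [replace_cons_pos _ _ F_ne _ _ (by simp [List.isPrefixOf])]
  have : ("%2F".toList : List Char).length = 3 := by decide
  rw [this]
  simp only [List.drop_succ_cons, List.drop_zero]
  rw [show ("/".toList : List Char) = ['/'] by decide, List.singleton_append,
      replace_cons_neg _ _ C_ne _ _ (by simp [List.isPrefixOf])]

theorem Rnorm_C (rest : List Char) : Rnorm ('%' :: '2' :: 'C' :: rest) = ',' :: Rnorm rest := by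
  unfold Rnorm
  rw [replace_cons_neg _ _ F_ne _ _ (by simp [List.isPrefixOf]),
      replace_cons_neg _ _ F_ne _ _ (by simp [List.isPrefixOf]),
      replace_cons_neg _ _ F_ne _ _ (by simp [List.isPrefixOf]),
      replace_cons_pos _ _ C_ne _ _ (by simp [List.isPrefixOf])]
  have : ("%2C".toList : List Char).length = 3 := by decide
  rw [this]
  simp only [List.drop_succ_cons, List.drop_zero]
  rfl

theorem Rnorm_comma (rest : List Char) : Rnorm (',' :: rest) = ',' :: Rnorm rest := by
  unfold Rnorm
  rw [replace_cons_neg _ _ F_ne _ _ (by simp [List.isPrefixOf]),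
      replace_cons_neg _ _ C_ne _ _ (by simp [List.isPrefixOf])]

-- head of replace · "%2F" "/" is the head of the argument, unless a replacement fires
theorem F_head_eq (r : Char) (t : List Char)
    (hp : ("%2F".toList : List Char).isPrefixOf (r :: t) = false) :
    PySem.Chars.replace (r :: t) "%2F".toList "/".toList =
      r :: PySem.Chars.replace t "%2F".toList "/".toList :=
  replace_cons_neg _ _ F_ne _ _ hp

-- if the %2C pattern matches '%' :: F(rest), then rest itself began with "2C"
theorem C_match_back (rest : List Char)
    (h : ("%2C".toList : List Char).isPrefixOf
        ('%' :: PySem.Chars.replace rest "%2F".toList "/".toList) = true) :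
    rest.take 2 = ['2', 'C'] := by
  have h2 : (['2', 'C'] : List Char).isPrefixOf
      (PySem.Chars.replace rest "%2F".toList "/".toList) = true := by
    revert h
    rw [show ("%2C".toList : List Char) = '%' :: ['2', 'C'] by decide]
    simp [List.isPrefixOf]
  cases rest with
  | nil =>
    rw [show PySem.Chars.replace [] "%2F".toList "/".toList = [] by decide] at h2
    simp [List.isPrefixOf] at h2
  | cons r t =>
    by_cases hp : ("%2F".toList : List Char).isPrefixOf (r :: t) = true
    · exfalso
      rw [replace_cons_pos _ _ F_ne _ _ hp] at h2
      rw [show ("/".toList : List Char) = ['/'] by decide] at h2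
      simp [List.isPrefixOf] at h2
    · rw [F_head_eq r t (Bool.eq_false_iff.mpr hp)] at h2
      have hr : r = '2' := by
        revert h2; simp [List.isPrefixOf]; intro h _; exact h.symm
      subst hr
      have h3 : (['C'] : List Char).isPrefixOf
          (PySem.Chars.replace t "%2F".toList "/".toList) = true := by
        revert h2; simp [List.isPrefixOf]
      cases t with
      | nil =>
        rw [show PySem.Chars.replace [] "%2F".toList "/".toList = [] by decide] at h3
        simp [List.isPrefixOf] at h3
      | cons r2 t2 =>
        by_cases hq : ("%2F".toList : List Char).isPrefixOf (r2 :: t2) = true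
        · exfalso
          rw [replace_cons_pos _ _ F_ne _ _ hq] at h3
          rw [show ("/".toList : List Char) = ['/'] by decide] at h3
          simp [List.isPrefixOf] at h3
        · rw [F_head_eq r2 t2 (Bool.eq_false_iff.mpr hq)] at h3
          have hr2 : r2 = 'C' := by
            revert h3; simp [List.isPrefixOf]; intro h; exact h.symm
          subst hr2; rfl

theorem prefix3_false (y z a b : Char) (t : List Char) (h : ¬(a = y ∧ b = z)) :
    (['%', y, z] : List Char).isPrefixOf ('%' :: a :: b :: t) = false := by
  simp only [List.isPrefixOf, beq_self_eq_true, Bool.true_and]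
  simp only [Bool.and_eq_false_iff]
  by_cases hy : a = y
  · right
    have hz : b ≠ z := fun hz => h ⟨hy, hz⟩
    simp [Ne.symm hz]
  · left; simp [Ne.symm hy]

-- the default scanner step: no pattern at the head, head copied through both replaces
theorem Rnorm_other (c : Char) (rest : List Char)
    (h1 : ¬(c = '%' ∧ rest.take 2 = ['2', 'F']))
    (h2 : ¬(c = '%' ∧ rest.take 2 = ['2', 'C'])) :
    Rnorm (c :: rest) = c :: Rnorm rest := by
  have hpF : ("%2F".toList : List Char).isPrefixOf (c :: rest) = false := by
    by_cases hc : c = '%'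
    · subst hc
      cases rest with
      | nil => decide
      | cons a t =>
        cases t with
        | nil =>
          rw [show ("%2F".toList : List Char) = '%' :: '2' :: ['F'] by decide]
          simp [List.isPrefixOf]
        | cons b t2 =>
          exact prefix3_false '2' 'F' a b t2
            (fun ⟨ha, hb⟩ => h1 ⟨rfl, by simp [ha, hb]⟩)
    · rw [show ("%2F".toList : List Char) = '%' :: '2' :: ['F'] by decide]
      simp [List.isPrefixOf, Ne.symm hc]
  unfold Rnorm
  rw [replace_cons_neg _ _ F_ne _ _ hpF]
  have hpC : ("%2C".toList : List Char).isPrefixOf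
      (c :: PySem.Chars.replace rest "%2F".toList "/".toList) = false := by
    by_cases hc : c = '%'
    · subst hc
      by_contra hcon
      have : ("%2C".toList : List Char).isPrefixOf
          ('%' :: PySem.Chars.replace rest "%2F".toList "/".toList) = true := by
        revert hcon; cases ("%2C".toList : List Char).isPrefixOf
          ('%' :: PySem.Chars.replace rest "%2F".toList "/".toList) <;> simp
      exact h2 ⟨rfl, C_match_back rest this⟩
    · rw [show ("%2C".toList : List Char) = '%' :: '2' :: ['C'] by decide]
      simp [List.isPrefixOf, Ne.symm hc]
  rw [replace_cons_neg _ _ C_ne _ _ hpC]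

-- ---- equations for PySem.Chars.splitOn.go (sep = [',']) ----
theorem sgo_zero (sep l cur : List Char) (acc : List (List Char)) :
    PySem.Chars.splitOn.go sep 0 l cur acc = ((cur.reverse ++ l) :: acc).reverse := by
  simp [PySem.Chars.splitOn.go]

theorem sgo_nil (sep : List Char) (fuel : Nat) (cur : List Char) (acc : List (List Char)) :
    PySem.Chars.splitOn.go sep fuel [] cur acc = (cur.reverse :: acc).reverse := by
  cases fuel <;> simp [PySem.Chars.splitOn.go]

theorem sgo_cons (sep : List Char) (fuel : Nat) (c : Char) (rest cur : List Char)
    (acc : List (List Char)) :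
    PySem.Chars.splitOn.go sep (fuel + 1) (c :: rest) cur acc =
      if sep.isPrefixOf (c :: rest) = true then
        PySem.Chars.splitOn.go sep fuel ((c :: rest).drop sep.length) [] (cur.reverse :: acc)
      else
        PySem.Chars.splitOn.go sep fuel rest (c :: cur) acc := by
  simp [PySem.Chars.splitOn.go]

theorem sgo_norm :
    ∀ fuel (l cur : List Char) (acc : List (List Char)), l.length ≤ fuel →
      PySem.Chars.splitOn.go [','] fuel l cur acc =
        acc.reverse ++ PySem.Chars.splitOn.go [','] l.length l cur [] := by
  intro fuel
  induction fuel using Nat.strong_induction_on with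
  | _ fuel ih =>
    intro l cur acc h
    cases l with
    | nil => rw [sgo_nil, sgo_nil]; simp
    | cons c rest =>
      cases fuel with
      | zero => simp at h
      | succ n =>
        have ht : rest.length ≤ n := by simpa using h
        simp only [List.length_cons]
        rw [sgo_cons, sgo_cons]
        by_cases hp : ([','] : List Char).isPrefixOf (c :: rest) = true
        · rw [if_pos hp, if_pos hp]
          simp only [List.length_cons, List.length_nil, List.drop_succ_cons, List.drop_zero]
          rw [ih n (Nat.lt_succ_self n) rest [] (cur.reverse :: acc) ht,
              ih rest.length (Nat.lt_succ_of_le ht) rest [] (cur.reverse :: []) le_rfl]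
          simp
        · rw [if_neg hp, if_neg hp]
          rw [ih n (Nat.lt_succ_self n) rest (c :: cur) acc ht]

-- prepend to the head part of a split result
def consHead (x : List Char) : List (List Char) → List (List Char)
  | [] => [x]
  | h :: t => (x ++ h) :: t

theorem consHead_consHead (x y : List Char) (G : List (List Char)) :
    consHead x (consHead y G) = consHead (x ++ y) G := by
  cases G <;> simp [consHead]

theorem consHead_nil (G : List (List Char)) (h : G ≠ []) : consHead [] G = G := by
  cases G with
  | nil => exact absurd rfl h
  | cons a t => simp [consHead]

theorem sgo_ne_nil :
    ∀ fuel (l cur : List Char) (acc : List (List Char)),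
      PySem.Chars.splitOn.go [','] fuel l cur acc ≠ [] := by
  intro fuel
  induction fuel using Nat.strong_induction_on with
  | _ fuel ih =>
    intro l cur acc
    cases l with
    | nil => rw [sgo_nil]; simp
    | cons c rest =>
      cases fuel with
      | zero => rw [sgo_zero]; simp
      | succ n =>
        rw [sgo_cons]
        by_cases hp : ([','] : List Char).isPrefixOf (c :: rest) = true
        · rw [if_pos hp]; exact ih n (Nat.lt_succ_self n) _ _ _
        · rw [if_neg hp]; exact ih n (Nat.lt_succ_self n) _ _ _

theorem sgo_cur :
    ∀ fuel (l cur : List Char), l.length ≤ fuel →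
      PySem.Chars.splitOn.go [','] fuel l cur [] =
        consHead cur.reverse (PySem.Chars.splitOn.go [','] fuel l [] []) := by
  intro fuel
  induction fuel using Nat.strong_induction_on with
  | _ fuel ih =>
    intro l cur h
    cases l with
    | nil => rw [sgo_nil, sgo_nil]; simp [consHead]
    | cons c rest =>
      cases fuel with
      | zero => simp at h
      | succ n =>
        have ht : rest.length ≤ n := by simpa using h
        rw [sgo_cons, sgo_cons]
        by_cases hp : ([','] : List Char).isPrefixOf (c :: rest) = true
        · rw [if_pos hp, if_pos hp]
          simp only [List.length_cons, List.length_nil, List.drop_succ_cons, List.drop_zero]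
          rw [sgo_norm n rest [] [cur.reverse] ht,
              sgo_norm n rest [] [List.reverse []] ht]
          simp [consHead]
        · rw [if_neg hp, if_neg hp]
          rw [ih n (Nat.lt_succ_self n) rest (c :: cur) ht,
              ih n (Nat.lt_succ_self n) rest (c :: []) ht,
              consHead_consHead]
          simp

theorem splitOn_canon (l : List Char) :
    PySem.Chars.splitOn l [','] = PySem.Chars.splitOn.go [','] l.length l [] [] := by
  simp only [PySem.Chars.splitOn]
  rw [sgo_norm (l.length + 1) l [] [] (Nat.le_succ _)]
  simp

theorem splitOn_never_nil (l : List Char) : PySem.Chars.splitOn l [','] ≠ [] := by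
  rw [splitOn_canon]; exact sgo_ne_nil _ _ _ _

theorem splitOn_nil : PySem.Chars.splitOn [] [','] = [[]] := by decide

theorem splitOn_comma (m : List Char) :
    PySem.Chars.splitOn (',' :: m) [','] = [] :: PySem.Chars.splitOn m [','] := by
  rw [splitOn_canon, splitOn_canon]
  simp only [List.length_cons]
  rw [sgo_cons, if_pos (by simp [List.isPrefixOf])]
  simp only [List.length_cons, List.length_nil, List.drop_succ_cons, List.drop_zero]
  rw [sgo_norm m.length m [] [List.reverse []] le_rfl]
  simp

theorem splitOn_cons_ne (c : Char) (m : List Char) (hc : c ≠ ',') :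
    PySem.Chars.splitOn (c :: m) [','] = consHead [c] (PySem.Chars.splitOn m [',']) := by
  rw [splitOn_canon, splitOn_canon]
  simp only [List.length_cons]
  rw [sgo_cons, if_neg (by simp [List.isPrefixOf]; exact fun h => hc h.symm),
      sgo_cur m.length m [c] le_rfl]
  rfl

-- ---- the scanner computes: flush the out-accumulator ----
theorem pvScan_out :
    ∀ n (cs : List Char), cs.length ≤ n → ∀ (token : List Char) (out : List String),
      pvScan cs token out = out ++ pvScan cs token [] := by
  intro n
  induction n with
  | zero =>
    intro cs h token out
    have : cs = [] := by cases cs <;> simp_all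
    subst this
    rw [pvScan, pvScan]
    by_cases ht : token = [] <;> simp [ht]
  | succ n ih =>
    intro cs h token out
    cases cs with
    | nil =>
      rw [pvScan, pvScan]
      by_cases ht : token = [] <;> simp [ht]
    | cons c rest =>
      have hr : rest.length ≤ n := by simpa using h
      have hd : (rest.drop 2).length ≤ n := by simp only [List.length_drop]; omega
      rw [pvScan, pvScan]
      simp only [List.nil_append]
      by_cases h1 : c = '%' ∧ rest.take 2 = ['2', 'F']
      · rw [if_pos h1, if_pos h1]; exact ih _ hd _ _
      · rw [if_neg h1, if_neg h1]
        by_cases h2 : c = '%' ∧ rest.take 2 = ['2', 'C']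
        · rw [if_pos h2, if_pos h2, ih _ hd [] (if token ≠ [] then out ++ [String.ofList token] else out),
              ih _ hd [] (if token ≠ [] then [String.ofList token] else [])]
          by_cases ht : token = [] <;> simp [ht]
        · rw [if_neg h2, if_neg h2]
          by_cases h3 : c = ','
          · rw [if_pos h3, if_pos h3, ih _ hr [] (if token ≠ [] then out ++ [String.ofList token] else out),
                ih _ hr [] (if token ≠ [] then [String.ofList token] else [])]
            by_cases ht : token = [] <;> simp [ht]
          · rw [if_neg h3, if_neg h3]; exact ih _ hr _ _

-- ---- the scanner equals A's per-item pipeline, at the character level ----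
theorem pvScan_eq :
    ∀ n (cs : List Char), cs.length ≤ n → ∀ (token : List Char),
      pvScan cs token [] =
        ((consHead token (PySem.Chars.splitOn (Rnorm cs) [','])).filter
            (fun p => p ≠ [])).map String.ofList := by
  intro n
  induction n with
  | zero =>
    intro cs h token
    have : cs = [] := by cases cs <;> simp_all
    subst this
    rw [pvScan, Rnorm_nil, splitOn_nil]
    by_cases ht : token = [] <;> simp [ht, consHead]
  | succ n ih =>
    intro cs h token
    cases cs with
    | nil =>
      rw [pvScan, Rnorm_nil, splitOn_nil]
      by_cases ht : token = [] <;> simp [ht, consHead]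
    | cons c rest =>
      have hr : rest.length ≤ n := by simpa using h
      have hd : (rest.drop 2).length ≤ n := by simp only [List.length_drop]; omega
      rw [pvScan]
      by_cases h1 : c = '%' ∧ rest.take 2 = ['2', 'F']
      · obtain ⟨hc, htake⟩ := h1
        subst hc
        obtain ⟨r2, hrest⟩ : ∃ r2, rest = '2' :: 'F' :: r2 := by
          cases rest with
          | nil => simp at htake
          | cons a t =>
            cases t with
            | nil => simp at htake
            | cons b t2 =>
              simp only [List.take_succ_cons, List.take_zero] at htake
              obtain ⟨ha, hb⟩ : a = '2' ∧ b = 'F' := by simpa using htake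
              exact ⟨t2, by rw [ha, hb]⟩
        subst hrest
        rw [if_pos ⟨rfl, rfl⟩]
        simp only [List.drop_succ_cons, List.drop_zero]
        rw [ih r2 (by simp only [List.length_cons] at h; omega) (token ++ ['/']),
            Rnorm_F, splitOn_cons_ne '/' _ (by decide), consHead_consHead]
      · rw [if_neg h1]
        by_cases h2 : c = '%' ∧ rest.take 2 = ['2', 'C']
        · obtain ⟨hc, htake⟩ := h2
          subst hc
          obtain ⟨r2, hrest⟩ : ∃ r2, rest = '2' :: 'C' :: r2 := by
            cases rest with
            | nil => simp at htake
            | cons a t =>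
              cases t with
              | nil => simp at htake
              | cons b t2 =>
                simp only [List.take_succ_cons, List.take_zero] at htake
                obtain ⟨ha, hb⟩ : a = '2' ∧ b = 'C' := by simpa using htake
                exact ⟨t2, by rw [ha, hb]⟩
          subst hrest
          rw [if_pos ⟨rfl, rfl⟩]
          simp only [List.drop_succ_cons, List.drop_zero]
          rw [pvScan_out r2.length r2 le_rfl [] _,
              ih r2 (by simp only [List.length_cons] at h; omega) [],
              consHead_nil _ (splitOn_never_nil _),
              Rnorm_C, splitOn_comma]
          by_cases ht : token = [] <;> simp [ht, consHead]
        · rw [if_neg h2]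
          by_cases h3 : c = ','
          · subst h3
            rw [if_pos rfl,
                pvScan_out rest.length rest le_rfl [] _,
                ih rest hr [],
                consHead_nil _ (splitOn_never_nil _),
                Rnorm_comma, splitOn_comma]
            by_cases ht : token = [] <;> simp [ht, consHead]
          · rw [if_neg h3,
                ih rest hr (token ++ [c]),
                Rnorm_other c rest h1 h2, splitOn_cons_ne c _ h3, consHead_consHead]

-- ---- string-level bridging ----
theorem filter_ne_empty_map (ps : List String) :
    (ps.filter (fun p => p ≠ "")).map String.toList =
      (ps.map String.toList).filter (fun p => p ≠ []) := by
  induction ps with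
  | nil => simp
  | cons p ps ihp =>
    simp only [ne_eq, decide_not] at ihp ⊢
    by_cases hpe : p = ""
    · subst hpe; simp [ihp]
    · have hne : p.toList ≠ [] := by
        intro hn
        exact hpe (by
          have := congrArg String.ofList hn
          simpa using this)
      simp [hpe, hne, ihp]

theorem parts_toList (s : String) :
    (((PySem.Str.split? s ",").getD []).filter (fun p => p ≠ "")).map String.toList =
      (PySem.Chars.splitOn s.toList [',']).filter (fun p => p ≠ []) := by
  have h := PySem.Str.split?_map s ","
  cases hsp : PySem.Str.split? s "," with
  | none => rw [hsp] at h; simp [PySem.Chars.split?] at h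
  | some ps =>
    rw [hsp] at h
    simp only [Option.map_some, PySem.Chars.split?] at h
    have hps : ps.map String.toList = PySem.Chars.splitOn s.toList ",".toList := by
      simpa using h
    rw [show (",".toList : List Char) = [','] by decide] at hps
    rw [← hps]
    simp only [Option.getD_some]
    exact filter_ne_empty_map ps

-- A's per-item contribution
def fA (item : String) : List String :=
  ((PySem.Str.split?
      (PySem.Str.replace (PySem.Str.replace item "%2F" "/") "%2C" ",") ",").getD []).filter
    (fun part => part ≠ "")

theorem fA_chars (item : String) :
    (fA item).map String.toList =
      (PySem.Chars.splitOn (Rnorm item.toList) [',']).filter (fun p => p ≠ []) := by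
  unfold fA
  rw [parts_toList]
  simp only [PySem.Str.toList_replace]
  rw [show (",".toList : List Char) = [','] by decide]
  rfl

theorem per_item (item : String) (out : List String) :
    pvScan item.toList [] out = out ++ fA item := by
  rw [pvScan_out item.toList.length item.toList le_rfl [] out,
      pvScan_eq item.toList.length item.toList le_rfl [],
      consHead_nil _ (splitOn_never_nil _), ← fA_chars, List.map_map]
  have : (String.ofList ∘ String.toList) = id := by
    funext s; simp [Function.comp]
  rw [this, List.map_id]

theorem foldl_eq (xs : List String) :
    ∀ acc : List String,
      xs.foldl (fun out item => pvScan item.toList [] out) acc =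
        xs.foldl (fun acc item => acc ++ fA item) acc := by
  induction xs with
  | nil => intro acc; rfl
  | cons x xs ihx =>
    intro acc
    simp only [List.foldl_cons]
    rw [per_item, ihx]

-- ===== VERDICT (by name: the statement is the Claim_ definition above) =====
theorem decode_alpn_spec : Claim_equal_decode_alpn := by
  intro items _
  unfold Spec_decode_alpn
  cases items with
  | none => rfl
  | some xs =>
    by_cases h : xs = []
    · subst h; rfl
    · simp only [decode_alpn, decode_alpn_alt, if_neg h]
      rw [foldl_eq xs []]
      rfl
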